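-- pv_equiv track=rewrite | github.com/lemon52/SmartETL | wikidata_filter/integrations/unstructured/text.py | _split_in_half_at_breakpoint
-- ===== SOURCE A (Python) =====
-- def _split_in_half_at_breakpoint(
--     content: str,
--     breakpoint: str = " ",
-- ) -> list[str]:
--     """Splits a segment of content at the breakpoint closest to the middle"""
--     mid = len(content) // 2
--     for i in range(len(content) // 2):
--         if content[mid + i] == breakpoint:
--             mid += i
--             break
--         elif content[mid - i] == breakpoint:
--             mid += -i
--             break
--
--     return [content[:mid].rstrip(), content[mid:].lstrip()]
-- ===== SOURCE B (Python) =====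
-- def _split_in_half_at_breakpoint(
--     content: str,
--     breakpoint: str = " ",
-- ) -> list[str]:
--     """Splits a segment of content at the breakpoint closest to the middle"""
--     mid = len(content) // 2
--     half = len(content) // 2
--     right = next((i for i in range(half) if content[mid + i] == breakpoint), None)
--     left = next((i for i in range(1, half) if content[mid - i] == breakpoint), None)
--     if right is not None and (left is None or right <= left):
--         mid += right
--     elif left is not None:
--         mid -= left
--     return [content[:mid].rstrip(), content[mid:].lstrip()]
-- ===== Notes on version B (the rewrite author's own statement) =====
-- stated objective: alternative
-- what changed: A's single interleaved outward scan with an early break is replaced by two independent directional first-match searches (right from the middle, left from the middle) followed by a distance comparison with right winning ties.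
import Mathlib
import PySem

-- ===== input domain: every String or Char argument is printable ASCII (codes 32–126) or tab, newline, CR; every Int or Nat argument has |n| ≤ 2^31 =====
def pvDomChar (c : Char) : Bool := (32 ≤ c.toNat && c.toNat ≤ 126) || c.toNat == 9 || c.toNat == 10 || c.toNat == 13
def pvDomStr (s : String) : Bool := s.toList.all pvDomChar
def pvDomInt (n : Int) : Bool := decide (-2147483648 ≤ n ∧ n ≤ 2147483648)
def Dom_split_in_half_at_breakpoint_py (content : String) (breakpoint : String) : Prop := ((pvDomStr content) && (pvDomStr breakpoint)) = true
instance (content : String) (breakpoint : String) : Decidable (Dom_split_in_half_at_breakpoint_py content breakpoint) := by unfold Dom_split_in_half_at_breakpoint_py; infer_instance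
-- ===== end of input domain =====

-- B replaces A's interleaved outward scan (one loop, early break) by two independent
-- directional first-match searches plus a distance comparison (objective: alternative).

-- shared by both ports: Python's `content[j] == breakpoint` (s[j] is a 1-char string)
def pvCharEq (content bp : String) (j : Int) : Bool :=
  match PySem.Str.pyGet? content j with
  | some c => [c] == bp.toList
  | none => false

-- ===== PORT A =====
-- A's `for i in range(len(content)//2): … break` over the offset list, carrying mid
def pvALoop (content bp : String) (mid : Int) : List Int → Int
  | [] => mid
  | i :: rest =>
    if pvCharEq content bp (mid + i) then mid + i
    else if pvCharEq content bp (mid - i) then mid - i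
    else pvALoop content bp mid rest

def split_in_half_at_breakpoint_py (content : String) (breakpoint : String) : List String :=
  let mid : Int := PySem.Int.floordiv (PySem.Str.len content) 2
  let mid' := pvALoop content breakpoint mid
      (PySem.List.pyRange 0 (PySem.Int.floordiv (PySem.Str.len content) 2) 1)
  [PySem.Str.rstrip (PySem.Str.slice content none (some mid')),
   PySem.Str.lstrip (PySem.Str.slice content (some mid') none)]

-- ===== PORT B =====
-- `next((i for i in range(half) if content[mid + i] == breakpoint), None)`
def pvFindRight (content bp : String) (mid : Int) : List Int → Option Int
  | [] => none
  | i :: rest => if pvCharEq content bp (mid + i) then some i else pvFindRight content bp mid rest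

-- `next((i for i in range(1, half) if content[mid - i] == breakpoint), None)`
def pvFindLeft (content bp : String) (mid : Int) : List Int → Option Int
  | [] => none
  | i :: rest => if pvCharEq content bp (mid - i) then some i else pvFindLeft content bp mid rest

def split_in_half_at_breakpoint_py_alt (content : String) (breakpoint : String) : List String :=
  let mid : Int := PySem.Int.floordiv (PySem.Str.len content) 2
  let half : Int := PySem.Int.floordiv (PySem.Str.len content) 2
  let right := pvFindRight content breakpoint mid (PySem.List.pyRange 0 half 1)
  let left := pvFindLeft content breakpoint mid (PySem.List.pyRange 1 half 1)
  let mid' : Int :=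
    match right, left with
    | some r, some l => if r ≤ l then mid + r else mid - l
    | some r, none => mid + r
    | none, some l => mid - l
    | none, none => mid
  [PySem.Str.rstrip (PySem.Str.slice content none (some mid')),
   PySem.Str.lstrip (PySem.Str.slice content (some mid') none)]

-- ===== PRECONDITION & SPEC =====
def Spec_split_in_half_at_breakpoint_py (content : String) (breakpoint : String) (out : List String) : Prop := out = split_in_half_at_breakpoint_py_alt content breakpoint
instance (content : String) (breakpoint : String) (out : List String) : Decidable (Spec_split_in_half_at_breakpoint_py content breakpoint out) := by unfold Spec_split_in_half_at_breakpoint_py; infer_instance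

-- ===== CLAIM (what is proved, stated in full; the proofs are below) =====
def Claim_equal_split_in_half_at_breakpoint_py : Prop := ∀ (content : String) (breakpoint : String), Dom_split_in_half_at_breakpoint_py content breakpoint → Spec_split_in_half_at_breakpoint_py content breakpoint (split_in_half_at_breakpoint_py content breakpoint)

-- ===== LEMMAS AND PROOFS =====

lemma pvFindRight_mem {content bp : String} {mid : Int} {L : List Int} {r : Int}
    (h : pvFindRight content bp mid L = some r) : r ∈ L := by
  induction L with
  | nil => simp [pvFindRight] at h
  | cons i rest ih =>
    by_cases hc : pvCharEq content bp (mid + i) = true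
    · simp [pvFindRight, hc] at h; simp [h]
    · simp [pvFindRight, hc] at h
      exact List.mem_cons_of_mem _ (ih h)

lemma pvFindLeft_mem {content bp : String} {mid : Int} {L : List Int} {l : Int}
    (h : pvFindLeft content bp mid L = some l) : l ∈ L := by
  induction L with
  | nil => simp [pvFindLeft] at h
  | cons i rest ih =>
    by_cases hc : pvCharEq content bp (mid - i) = true
    · simp [pvFindLeft, hc] at h; simp [h]
    · simp [pvFindLeft, hc] at h
      exact List.mem_cons_of_mem _ (ih h)

-- A's interleaved scan over [a, b) equals picking the nearer of the two first matches (right wins ties)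
lemma pvALoop_eq (content bp : String) (mid : Int) (a b : Int) :
    pvALoop content bp mid (PySem.List.pyRange a b 1) =
      (match pvFindRight content bp mid (PySem.List.pyRange a b 1),
             pvFindLeft content bp mid (PySem.List.pyRange a b 1) with
       | some r, some l => if r ≤ l then mid + r else mid - l
       | some r, none => mid + r
       | none, some l => mid - l
       | none, none => mid) := by
  obtain ⟨n, hn⟩ : ∃ n, (b - a).toNat = n := ⟨_, rfl⟩
  induction n generalizing a with
  | zero =>
    have hba : b ≤ a := by omega
    simp [PySem.List.pyRange_one_eq_nil hba, pvALoop, pvFindRight, pvFindLeft]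
  | succ n ih =>
    have hab : a < b := by omega
    rw [PySem.List.pyRange_one_cons hab]
    by_cases hR : pvCharEq content bp (mid + a) = true
    · by_cases hL : pvCharEq content bp (mid - a) = true
      · simp [pvALoop, pvFindRight, pvFindLeft, hR, hL]
      · simp only [pvALoop, pvFindRight, pvFindLeft, hR, hL, if_pos, Bool.false_eq_true,
          if_false]
        cases hfl : pvFindLeft content bp mid (PySem.List.pyRange (a + 1) b 1) with
        | none => simp
        | some l =>
          have hm := pvFindLeft_mem hfl
          rw [PySem.List.mem_pyRange_one] at hm
          have hle : a ≤ l := by omega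
          simp [hle]
    · by_cases hL : pvCharEq content bp (mid - a) = true
      · simp only [pvALoop, pvFindRight, pvFindLeft, hR, hL, Bool.false_eq_true, if_true, if_false]
        cases hfr : pvFindRight content bp mid (PySem.List.pyRange (a + 1) b 1) with
        | none => simp
        | some r =>
          have hm := pvFindRight_mem hfr
          rw [PySem.List.mem_pyRange_one] at hm
          have hle : ¬ r ≤ a := by omega
          simp [hle]
      · simp only [pvALoop, pvFindRight, pvFindLeft, hR, hL, Bool.false_eq_true, if_false]
        exact ih (a + 1) (by omega)

theorem split_in_half_at_breakpoint_py_spec : Claim_equal_split_in_half_at_breakpoint_py := by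
  intro content bp _
  unfold Spec_split_in_half_at_breakpoint_py split_in_half_at_breakpoint_py
    split_in_half_at_breakpoint_py_alt
  set mid := PySem.Int.floordiv (PySem.Str.len content) 2 with hmid
  dsimp only
  rw [pvALoop_eq]
  have h : (match pvFindRight content bp mid (PySem.List.pyRange 0 mid 1),
                  pvFindLeft content bp mid (PySem.List.pyRange 0 mid 1) with
            | some r, some l => if r ≤ l then mid + r else mid - l
            | some r, none => mid + r
            | none, some l => mid - l
            | none, none => mid) =
           (match pvFindRight content bp mid (PySem.List.pyRange 0 mid 1),
                  pvFindLeft content bp mid (PySem.List.pyRange 1 mid 1) with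
            | some r, some l => if r ≤ l then mid + r else mid - l
            | some r, none => mid + r
            | none, some l => mid - l
            | none, none => mid) := by
    by_cases hm : mid ≤ 0
    · rw [PySem.List.pyRange_one_eq_nil hm, PySem.List.pyRange_one_eq_nil (by omega : mid ≤ (1:Int))]
    · have hm' : (0:Int) < mid := by omega
      rw [PySem.List.pyRange_one_cons hm', (by norm_num : (0:Int) + 1 = 1)]
      by_cases hc : pvCharEq content bp (mid + 0) = true
      · have hc' : pvCharEq content bp (mid - 0) = true := by
          simpa [sub_zero, add_zero] using hc
        simp only [pvFindRight, pvFindLeft, hc, hc', if_true]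
        cases hfl : pvFindLeft content bp mid (PySem.List.pyRange 1 mid 1) with
        | none => simp
        | some l =>
          have hm2 := pvFindLeft_mem hfl
          rw [PySem.List.mem_pyRange_one] at hm2
          have hle : (0:Int) ≤ l := by omega
          simp [hle]
      · have hc' : ¬ pvCharEq content bp (mid - 0) = true := by
          simpa [sub_zero, add_zero] using hc
        simp only [pvFindRight, pvFindLeft, hc, hc', Bool.false_eq_true, if_false]
  rw [h]
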